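-- pv_equiv track=rewrite | github.com/Haksell/codeforces | problems/2057C.py | smart
-- ===== SOURCE A (Python) =====
-- def smart(l, r):
--     b = 1 << (r.bit_length() - 1)
--     if b - 2 >= l:
--         return (b - 2, b - 1, b)
--     elif b - 1 == l:
--         return (b - 1, b, b + 1)
--     else:
--         i, j, k = smart(l - b, r - b)
--         return (i | b, j | b, k | b)
-- ===== SOURCE B (Python) =====
-- def smart(l, r):
--     # Phase 1: strip the high bits shared by l and r into acc.
--     acc = 0
--     b = 1 << (r.bit_length() - 1)
--     while l >= b:
--         acc |= b
--         l -= b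
--         r -= b
--         b = 1 << (r.bit_length() - 1)
--     # Phase 2: a single two-way choice on the reduced l.
--     if l <= b - 2:
--         return (acc | (b - 2), acc | (b - 1), acc | b)
--     return (acc | (b - 1), acc | b, acc | (b + 1))
-- ===== Notes on version B (the rewrite author's own statement) =====
-- stated objective: alternative
-- what changed: Replaces A's three-branch recursion (which ORs the stripped top bit into each component on the way back up) by two separate phases: a loop with the single condition l >= b that strips the common high bits into an accumulator, followed by one two-way branch that builds the triple directly from the accumulator.
import Mathlib
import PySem

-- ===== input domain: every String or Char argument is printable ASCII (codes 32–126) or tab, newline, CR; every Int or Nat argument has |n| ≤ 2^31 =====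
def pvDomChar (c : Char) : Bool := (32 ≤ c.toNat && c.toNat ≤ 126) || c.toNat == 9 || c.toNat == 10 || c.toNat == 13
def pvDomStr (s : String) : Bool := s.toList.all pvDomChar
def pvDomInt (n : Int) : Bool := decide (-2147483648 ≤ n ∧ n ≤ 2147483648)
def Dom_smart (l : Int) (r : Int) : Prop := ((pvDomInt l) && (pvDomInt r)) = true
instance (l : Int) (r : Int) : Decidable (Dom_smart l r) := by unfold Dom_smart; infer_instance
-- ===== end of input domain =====

-- B splits A's three-branch recursion into two phases: a prefix-stripping loop with a single
-- condition and an accumulator, then one two-way branch building the triple (alternative decomposition, same cost).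

-- ===== PORT A =====
-- Python's r.bit_length() ignores the sign: it is Nat.size r.natAbs; 1 << (bit_length-1) = 2^(bit_length-1)
-- (Nat subtraction; bit_length = 0 only at r = 0, where Python raises — outside Pre_smart).
def pyTopBit (r : Int) : Int := 2 ^ (Nat.size r.natAbs - 1)

def smart (l : Int) (r : Int) : Int × Int × Int :=
  let b : Int := pyTopBit r
  if b - 2 ≥ l then (b - 2, b - 1, b)
  else if b - 1 = l then (b - 1, b, b + 1)
  else
    let t := smart (l - b) (r - b)
    (Int.lor t.1 b, Int.lor t.2.1 b, Int.lor t.2.2 b)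
termination_by l.toNat
decreasing_by
  have hb : (0:Int) < pyTopBit r := by unfold pyTopBit; positivity
  omega

-- ===== PORT B =====
-- phase 1 of Source B: the while-loop 'while l >= b: acc |= b; l -= b; r -= b; b = top(r)'
-- returned as the post-loop state (acc, l, b)
def stripCommon (acc : Int) (l : Int) (r : Int) : Int × Int × Int :=
  let b : Int := pyTopBit r
  if l ≥ b then stripCommon (Int.lor acc b) (l - b) (r - b)
  else (acc, l, b)
termination_by l.toNat
decreasing_by
  have hb : (0:Int) < pyTopBit r := by unfold pyTopBit; positivity
  omega

-- phase 2 of Source B: the final two-way branch on the reduced state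
def smart_alt (l : Int) (r : Int) : Int × Int × Int :=
  let s := stripCommon 0 l r
  let acc := s.1
  let l' := s.2.1
  let b := s.2.2
  if l' ≤ b - 2 then (Int.lor acc (b - 2), Int.lor acc (b - 1), Int.lor acc b)
  else (Int.lor acc (b - 1), Int.lor acc b, Int.lor acc (b + 1))

-- ===== PRECONDITION & SPEC =====
-- Pre_: exactly the inputs on which Python's smart returns; it raises ValueError ('1 << -1',
-- bit_length 0 when the recursion reaches r = 0) iff r = 0 or (r ≥ 1 and l ≥ r).
def Pre_smart (l : Int) (r : Int) : Prop := r < 0 ∨ (1 ≤ r ∧ l < r)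
instance (l : Int) (r : Int) : Decidable (Pre_smart l r) := by unfold Pre_smart; infer_instance
def pvWitness_smart : Int × Int := (0, 2)

def Spec_smart (l : Int) (r : Int) (out : Int × Int × Int) : Prop := out = smart_alt l r
instance (l : Int) (r : Int) (out : Int × Int × Int) : Decidable (Spec_smart l r out) := by unfold Spec_smart; infer_instance

-- ===== CLAIM (what is proved, stated in full; the proofs are below) =====
def Claim_equal_smart : Prop := ∀ (l : Int) (r : Int), Dom_smart l r → Pre_smart l r → Spec_smart l r (smart l r)

-- ===== LEMMAS AND PROOFS =====

theorem int_lor_rot (a b c : Int) : Int.lor (Int.lor a b) c = Int.lor a (Int.lor c b) := by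
  cases a <;> cases b <;> cases c <;> simp only [Int.lor] <;> congr 1 <;>
    apply Nat.eq_of_testBit_eq <;> intro k <;>
    simp only [Nat.testBit_lor, Nat.testBit_land, Nat.testBit_ldiff] <;>
    cases Nat.testBit _ k <;> cases Nat.testBit _ k <;> cases Nat.testBit _ k <;> simp

theorem int_zero_lor (a : Int) : Int.lor 0 a = a := by
  cases a <;> simp only [Int.lor] <;> congr 1 <;> apply Nat.eq_of_testBit_eq <;> intro k <;>
    simp [Nat.testBit_ldiff]

-- the post-loop branch of B, as a function of the loop state
def finishB (s : Int × Int × Int) : Int × Int × Int :=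
  if s.2.1 ≤ s.2.2 - 2 then
    (Int.lor s.1 (s.2.2 - 2), Int.lor s.1 (s.2.2 - 1), Int.lor s.1 s.2.2)
  else (Int.lor s.1 (s.2.2 - 1), Int.lor s.1 s.2.2, Int.lor s.1 (s.2.2 + 1))

theorem smart_alt_eq_finish (l r : Int) : smart_alt l r = finishB (stripCommon 0 l r) := rfl

-- loop invariant: B's loop + final branch compute A's result with acc ORed onto every component
theorem strip_finish_eq (n : Nat) : ∀ (l r acc : Int), l.toNat ≤ n →
    finishB (stripCommon acc l r) =
      (Int.lor acc (smart l r).1, Int.lor acc (smart l r).2.1, Int.lor acc (smart l r).2.2) := by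
  induction n with
  | zero =>
    intro l r acc hl
    have hb : (0:Int) < pyTopBit r := by unfold pyTopBit; positivity
    rw [smart, stripCommon]
    have hno : ¬ (l ≥ pyTopBit r) := by omega
    simp only [hno, if_false, finishB]
    by_cases h1 : pyTopBit r - 2 ≥ l
    · have h2 : l ≤ pyTopBit r - 2 := by omega
      rw [if_pos h1, if_pos h2]
    · have h2 : pyTopBit r - 1 = l := by omega
      have h3 : ¬ (l ≤ pyTopBit r - 2) := by omega
      rw [if_neg h1, if_pos h2, if_neg h3]
  | succ n ih =>
    intro l r acc hl
    have hb : (0:Int) < pyTopBit r := by unfold pyTopBit; positivity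
    rw [smart, stripCommon]
    by_cases h1 : l ≥ pyTopBit r
    · have h2 : ¬ (pyTopBit r - 2 ≥ l) := by omega
      have h3 : ¬ (pyTopBit r - 1 = l) := by omega
      have hrec : (l - pyTopBit r).toNat ≤ n := by omega
      simp only [h1, if_true, h2, h3, if_false,
        ih (l - pyTopBit r) (r - pyTopBit r) (Int.lor acc (pyTopBit r)) hrec, int_lor_rot]
    · simp only [h1, if_false, finishB]
      by_cases h2 : pyTopBit r - 2 ≥ l
      · have h3 : l ≤ pyTopBit r - 2 := by omega
        rw [if_pos h2, if_pos h3]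
      · have h3 : pyTopBit r - 1 = l := by omega
        have h4 : ¬ (l ≤ pyTopBit r - 2) := by omega
        rw [if_neg h2, if_pos h3, if_neg h4]

-- ===== VERDICT =====
theorem smart_spec : Claim_equal_smart := by
  intro l r _ _
  unfold Spec_smart
  rw [smart_alt_eq_finish, strip_finish_eq l.toNat l r 0 (le_refl _)]
  simp only [int_zero_lor]
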